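-- pv_equiv track=rewrite | github.com/Regan-Law/Git_Regan | AutoTest_Python/Experiment5/Days/CountDays.py | days_from_new_year
-- ===== SOURCE A (Python) =====
-- def days_from_new_year(year, month, day):
-- 	days_in_month = [31, 28, 31, 30, 31, 30, 31, 31, 30, 31, 30, 31]
-- 	if year % 4 == 0 and (year % 100 != 0 or year % 400 == 0):
-- 		days_in_month[1] = 29
--
-- 	days = day
-- 	for i in range(month - 1):
-- 		days += days_in_month[i]
--
-- 	return days
-- ===== SOURCE B (Python) =====
-- CUM = [0, 31, 59, 90, 120, 151, 181, 212, 243, 273, 304, 334, 365]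
--
-- def days_from_new_year(year, month, day):
--     if month <= 1:
--         return day
--     leap = year % 4 == 0 and (year % 100 != 0 or year % 400 == 0)
--     return day + CUM[month - 1] + (1 if leap and month > 2 else 0)
-- ===== Notes on version B (the rewrite author's own statement) =====
-- stated objective: idiomatic
-- what changed: Replaces the per-month summing loop with a precomputed cumulative days-before-month table plus a leap-day adjustment for months after February, so no loop is executed.
import Mathlib
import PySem

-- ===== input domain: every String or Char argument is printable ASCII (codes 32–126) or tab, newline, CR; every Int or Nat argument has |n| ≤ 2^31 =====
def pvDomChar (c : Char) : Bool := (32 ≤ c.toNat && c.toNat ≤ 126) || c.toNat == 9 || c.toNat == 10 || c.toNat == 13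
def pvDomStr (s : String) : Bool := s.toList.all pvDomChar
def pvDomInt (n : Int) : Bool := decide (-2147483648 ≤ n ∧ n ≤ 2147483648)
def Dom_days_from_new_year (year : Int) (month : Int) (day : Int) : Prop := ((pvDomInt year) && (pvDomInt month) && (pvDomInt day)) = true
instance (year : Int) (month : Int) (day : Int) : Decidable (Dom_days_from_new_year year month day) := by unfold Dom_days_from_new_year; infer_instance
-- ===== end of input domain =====

-- B replaces A's per-month summing loop by a precomputed cumulative days-before-month
-- table with a leap-day adjustment (idiomatic, no loop).


-- ===== PORT A =====
def days_from_new_year (year : Int) (month : Int) (day : Int) : Int :=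
  let days_in_month : List Int := [31, 28, 31, 30, 31, 30, 31, 31, 30, 31, 30, 31]
  let days_in_month :=
    if PySem.Int.mod year 4 = 0 ∧ (PySem.Int.mod year 100 ≠ 0 ∨ PySem.Int.mod year 400 = 0)
    then PySem.List.pySetD days_in_month 1 29 else days_in_month
  (PySem.List.pyRange 0 (month - 1) 1).foldl
    (fun days i => days + PySem.List.pyGetD days_in_month i 0) day

-- ===== PORT B =====
def cumDays : List Int := [0, 31, 59, 90, 120, 151, 181, 212, 243, 273, 304, 334, 365]

def days_from_new_year_alt (year : Int) (month : Int) (day : Int) : Int :=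
  if month ≤ 1 then day
  else
    let leap := PySem.Int.mod year 4 = 0 ∧ (PySem.Int.mod year 100 ≠ 0 ∨ PySem.Int.mod year 400 = 0)
    day + PySem.List.pyGetD cumDays (month - 1) 0 + (if leap ∧ month > 2 then 1 else 0)

-- ===== PRECONDITION & SPEC =====
-- Pre_ excludes month ≥ 14, where both Pythons raise IndexError (list index out of range).
def Pre_days_from_new_year (year : Int) (month : Int) (day : Int) : Prop := month ≤ 13
instance (year : Int) (month : Int) (day : Int) : Decidable (Pre_days_from_new_year year month day) := by unfold Pre_days_from_new_year; infer_instance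
def pvWitness_days_from_new_year : Int × Int × Int := (2024, 3, 15)


def Spec_days_from_new_year (year : Int) (month : Int) (day : Int) (out : Int) : Prop := out = days_from_new_year_alt year month day
instance (year : Int) (month : Int) (day : Int) (out : Int) : Decidable (Spec_days_from_new_year year month day out) := by unfold Spec_days_from_new_year; infer_instance

-- ===== CLAIM (what is proved, stated in full; the proofs are below) =====
def Claim_equal_days_from_new_year : Prop := ∀ (year : Int) (month : Int) (day : Int), Dom_days_from_new_year year month day → Pre_days_from_new_year year month day → Spec_days_from_new_year year month day (days_from_new_year year month day)

-- ===== LEMMAS AND PROOFS =====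

-- Loop of A (with an abstract leap flag b) equals B's table lookup, for 2 ≤ month ≤ 13.
theorem pv_loop_eq_table (b : Prop) [Decidable b] (month day : Int)
    (h2 : 2 ≤ month) (h13 : month ≤ 13) :
    (PySem.List.pyRange 0 (month - 1) 1).foldl
      (fun days i => days + PySem.List.pyGetD
        (if b then PySem.List.pySetD [31, 28, 31, 30, 31, 30, 31, 31, 30, 31, 30, 31] 1 29
         else [31, 28, 31, 30, 31, 30, 31, 31, 30, 31, 30, 31]) i 0) day
    = day + PySem.List.pyGetD cumDays (month - 1) 0 + (if b ∧ month > 2 then 1 else 0) := by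
  by_cases hb : b <;>
    interval_cases month <;>
    simp [hb, cumDays, PySem.List.pyRange_one, List.range_succ, PySem.List.pyGetD,
          PySem.List.pyIdx?, PySem.List.pySetD, PySem.List.pySet?] <;> omega

-- ===== VERDICT (by name: the statement is the Claim_ definition above) =====
theorem days_from_new_year_spec : Claim_equal_days_from_new_year := by
  intro year month day _ hpre
  unfold Spec_days_from_new_year days_from_new_year days_from_new_year_alt Pre_days_from_new_year at *
  by_cases hm : month ≤ 1
  · simp [hm]
  · rw [if_neg hm]
    exact pv_loop_eq_table _ month day (by omega) (by omega)
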